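-- pv_equiv track=rewrite | github.com/yy487/vn-tool | avg32/avg3217_common.py | parse_cond_expr
-- ===== SOURCE A (Python) =====
-- def varint_width(data, p):
--     if p >= len(data): return 1
--     b1 = data[p]
--     return max(1, (b1 & 0x70) >> 4)
--
-- def parse_cond_expr(data, start):
--     if start >= len(data):
--         return None
--     p = start
--     if data[p] != 0x28:
--         return p + 1
--     depth = 0
--     while p < len(data):
--         c = data[p]
--         if c == 0x28:
--             depth += 1; p += 1
--         elif c == 0x29:
--             depth -= 1; p += 1
--             if depth == 0: return p
--         elif c in (0x26, 0x27):
--             p += 1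
--         elif 0x36 <= c <= 0x55:
--             p += 1
--             p += varint_width(data, p)
--             p += varint_width(data, p)
--         else:
--             p += 1
--     return None
-- ===== SOURCE B (Python) =====
-- def varint_width(data, p):
--     if p >= len(data): return 1
--     b1 = data[p]
--     return max(1, (b1 & 0x70) >> 4)
--
-- def parse_group(data, p):
--     # p points at an opening 0x28; return the index just past its matching 0x29
--     p += 1
--     while p < len(data):
--         c = data[p]
--         if c == 0x29:
--             return p + 1
--         if c == 0x28:
--             p = parse_group(data, p)
--             if p is None:
--                 return None
--         elif 0x36 <= c <= 0x55:
--             p += 1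
--             p += varint_width(data, p)
--             p += varint_width(data, p)
--         else:
--             p += 1
--     return None
--
-- def parse_cond_expr(data, start):
--     if start >= len(data):
--         return None
--     if data[start] != 0x28:
--         return start + 1
--     return parse_group(data, start)
-- ===== Notes on version B (the rewrite author's own statement) =====
-- stated objective: alternative
-- what changed: A's single flat while-loop with an integer depth counter is replaced by recursive descent: a parse_group helper consumes tokens and recurses on each nested '(', carrying the nesting on the call stack instead of in a depth variable.
import Mathlib
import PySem

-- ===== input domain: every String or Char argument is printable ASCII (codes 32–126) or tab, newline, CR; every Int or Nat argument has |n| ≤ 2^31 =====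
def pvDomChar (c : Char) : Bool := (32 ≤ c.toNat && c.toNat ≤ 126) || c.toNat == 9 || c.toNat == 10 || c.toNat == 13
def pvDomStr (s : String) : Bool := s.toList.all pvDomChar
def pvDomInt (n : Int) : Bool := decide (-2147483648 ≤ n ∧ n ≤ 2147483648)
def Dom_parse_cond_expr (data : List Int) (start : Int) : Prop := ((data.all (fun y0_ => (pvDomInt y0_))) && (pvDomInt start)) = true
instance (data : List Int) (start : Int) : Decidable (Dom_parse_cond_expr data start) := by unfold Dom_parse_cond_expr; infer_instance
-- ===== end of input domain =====

-- B re-implements A's flat depth-counter loop as recursive descent (nesting carried by the call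
-- stack); same return value everywhere A returns (both raise IndexError iff start < -len(data)).

-- ===== PORT A =====
-- shared module helper varint_width (identical in Source A and Source B).
-- (b1 & 0x70) >> 4 : the band result is nonnegative, so the shift is floor-division by 16 (exact).
-- Python raises IndexError when p < -len (excluded by Pre_): 1 there keeps the helper total.
def vw (data : List Int) (p : Int) : Int :=
  if p ≥ (data.length : Int) then 1
  else match PySem.List.pyGet? data p with
    | none => 1
    | some b1 => max 1 (PySem.Int.floordiv (PySem.Int.band b1 0x70) 16)

theorem vw_ge_one (data : List Int) (p : Int) : 1 ≤ vw data p := by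
  unfold vw
  split
  · exact le_refl 1
  · split
    · exact le_refl 1
    · exact le_max_left _ _

-- A's while loop: pyGet? = none marks Python's IndexError (only reachable outside Pre_).
def loopA (data : List Int) (p : Int) (depth : Int) : Option Int :=
  if _h : p < (data.length : Int) then
    match PySem.List.pyGet? data p with
    | none => none
    | some c =>
      if c = 0x28 then loopA data (p + 1) (depth + 1)
      else if c = 0x29 then
        if depth - 1 = 0 then some (p + 1) else loopA data (p + 1) (depth - 1)
      else if c = 0x26 ∨ c = 0x27 then loopA data (p + 1) depth
      else if 0x36 ≤ c ∧ c ≤ 0x55 then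
        let p1 := p + 1
        let p2 := p1 + vw data p1
        loopA data (p2 + vw data p2) depth
      else loopA data (p + 1) depth
  else none
termination_by (data.length - p).toNat
decreasing_by
  all_goals first
  | omega
  | (have h1 := vw_ge_one data (p + 1)
     have h2 := vw_ge_one data (p + 1 + vw data (p + 1))
     omega)

def parse_cond_expr (data : List Int) (start : Int) : Option Int :=
  if start ≥ (data.length : Int) then none
  else match PySem.List.pyGet? data start with
    | none => none   -- IndexError in Python: start < -len, excluded by Pre_
    | some c => if c ≠ 0x28 then some (start + 1) else loopA data start 0

-- ===== PORT B =====
-- B's parse_group(data, p) scans the body of the group whose '(' sits at p - 1 and returns the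
-- index just past its matching ')'; the fuel parameter is only a totality guard for Lean (the
-- Python recursion needs none): the top level passes (len - start).toNat + 1, which is never
-- exhausted since every step advances p by at least 1.
def scanB (data : List Int) : Nat → Int → Option Int
  | 0, _ => none
  | f + 1, p =>
    if p < (data.length : Int) then
      match PySem.List.pyGet? data p with
      | none => none   -- IndexError in Python, excluded by Pre_
      | some c =>
        if c = 0x29 then some (p + 1)
        else if c = 0x28 then
          match scanB data f (p + 1) with
          | none => none
          | some q => scanB data f q
        else if 0x36 ≤ c ∧ c ≤ 0x55 then
          let p1 := p + 1
          let p2 := p1 + vw data p1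
          scanB data f (p2 + vw data p2)
        else scanB data f (p + 1)
    else none

def parse_cond_expr_alt (data : List Int) (start : Int) : Option Int :=
  if start ≥ (data.length : Int) then none
  else match PySem.List.pyGet? data start with
    | none => none   -- IndexError in Python: start < -len, excluded by Pre_
    | some c =>
      if c ≠ 0x28 then some (start + 1)
      else scanB data ((data.length - start).toNat + 1) (start + 1)

-- ===== PRECONDITION & SPEC =====
-- Pre_ excludes exactly the inputs where Python A raises IndexError (start < -len(data));
-- B raises there too.
def Pre_parse_cond_expr (data : List Int) (start : Int) : Prop :=
  -(data.length : Int) ≤ start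
instance (data : List Int) (start : Int) : Decidable (Pre_parse_cond_expr data start) := by
  unfold Pre_parse_cond_expr; infer_instance

def pvWitness_parse_cond_expr : List Int × Int := ([0x28, 0x40, 3, 5, 0x29], 0)

def Spec_parse_cond_expr (data : List Int) (start : Int) (out : Option Int) : Prop := out = parse_cond_expr_alt data start
instance (data : List Int) (start : Int) (out : Option Int) : Decidable (Spec_parse_cond_expr data start out) := by unfold Spec_parse_cond_expr; infer_instance

-- ===== CLAIM (what is proved, stated in full; the proofs are below) =====
def Claim_equal_parse_cond_expr : Prop := ∀ (data : List Int) (start : Int), Dom_parse_cond_expr data start → Pre_parse_cond_expr data start → Spec_parse_cond_expr data start (parse_cond_expr data start)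

-- ===== LEMMAS AND PROOFS =====

-- a successful scan ends strictly right of where it started and inside (just past) the data
theorem scanB_some_bounds (data : List Int) :
    ∀ (f : Nat) (p q : Int), scanB data f p = some q → p < q ∧ q ≤ (data.length : Int) := by
  intro f
  induction f with
  | zero => intro p q h; simp [scanB] at h
  | succ n ih =>
    intro p q h
    rw [scanB] at h
    split at h
    · rename_i hlt
      match hg : PySem.List.pyGet? data p with
      | none => rw [hg] at h; exact absurd h (by simp)
      | some c =>
        rw [hg] at h
        dsimp only at h
        split_ifs at h with h29 h28 htok
        · cases h; omega
        · match h1 : scanB data n (p + 1) with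
          | none => rw [h1] at h; exact absurd h (by simp)
          | some q1 =>
            rw [h1] at h
            have b1 := ih (p + 1) q1 h1
            have b2 := ih q1 q h
            omega
        · have b := ih _ _ h
          have h1 := vw_ge_one data (p + 1)
          have h2 := vw_ge_one data (p + 1 + vw data (p + 1))
          omega
        · have b := ih _ _ h
          omega
    · exact absurd h (by simp)

-- any fuel strictly above the remaining distance gives the same result
theorem scanB_irrel (data : List Int) :
    ∀ (f₁ f₂ : Nat) (p : Int),
      ((data.length : Int) - p).toNat < f₁ → ((data.length : Int) - p).toNat < f₂ →
      scanB data f₁ p = scanB data f₂ p := by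
  intro f₁
  induction f₁ with
  | zero => intro f₂ p h1 _; omega
  | succ n ih =>
    intro f₂ p h1 h2
    match f₂ with
    | 0 => omega
    | m + 1 =>
      rw [scanB, scanB]
      split
      · rename_i hlt
        match hg : PySem.List.pyGet? data p with
        | none => rfl
        | some c =>
          dsimp only
          split_ifs with h29 h28 htok
          · rfl
          · have e1 : scanB data n (p + 1) = scanB data m (p + 1) := ih m (p + 1) (by omega) (by omega)
            rw [e1]
            match h1' : scanB data m (p + 1) with
            | none => rfl
            | some q1 =>
              have b1 := scanB_some_bounds data m (p + 1) q1 h1'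
              exact ih m q1 (by omega) (by omega)
          · have w1 := vw_ge_one data (p + 1)
            have w2 := vw_ge_one data (p + 1 + vw data (p + 1))
            exact ih m _ (by omega) (by omega)
          · exact ih m (p + 1) (by omega) (by omega)
      · rfl
  
-- chain d p : close d still-open groups starting at p (the meaning of A's depth counter)
def chain (data : List Int) : Nat → Int → Option Int
  | 0, p => some p
  | d + 1, p => (scanB data (((data.length : Int) - p).toNat + 1) p).bind (chain data d)

theorem loopA_eq_chain (data : List Int) (p : Int) (d : Nat) :
    loopA data p ((d : Int) + 1) = chain data (d + 1) p := by
  rw [loopA]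
  show _ = (scanB data (((data.length : Int) - p).toNat + 1) p).bind (chain data d)
  split
  · rename_i hlt
    rw [scanB]
    simp only [if_pos hlt]
    match hg : PySem.List.pyGet? data p with
    | none => rfl
    | some c =>
      by_cases h28 : c = 0x28
      · -- nested '(' : A deepens the counter, B recurses
        have h29 : ¬ c = 0x29 := by omega
        simp only [if_pos h28, if_neg h29]
        have harith : ((d : Int) + 1) + 1 = ((d + 1 : Nat) : Int) + 1 := by push_cast; ring
        rw [harith, loopA_eq_chain data (p + 1) (d + 1)]
        show chain data (d + 2) (p + 1) = _
        have hf : (((data.length : Int) - p).toNat) = (((data.length : Int) - (p + 1)).toNat + 1) := by omega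
        rw [hf]
        show _ = (match scanB data (((data.length : Int) - (p + 1)).toNat + 1) (p + 1) with
                  | none => none
                  | some q => scanB data (((data.length : Int) - (p + 1)).toNat + 1) q).bind (chain data d)
        rw [show chain data (d + 2) (p + 1)
              = (scanB data (((data.length : Int) - (p + 1)).toNat + 1) (p + 1)).bind (chain data (d + 1)) from rfl]
        match hs : scanB data (((data.length : Int) - (p + 1)).toNat + 1) (p + 1) with
        | none => rfl
        | some q1 =>
          have b1 := scanB_some_bounds data _ _ _ hs
          simp only [Option.bind_some]
          rw [show chain data (d + 1) q1
                = (scanB data (((data.length : Int) - q1).toNat + 1) q1).bind (chain data d) from rfl]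
          rw [scanB_irrel data (((data.length : Int) - (p + 1)).toNat + 1) (((data.length : Int) - q1).toNat + 1) q1 (by omega) (by omega)]
      · by_cases h29 : c = 0x29
        · -- ')' : A decrements, B closes the current frame
          simp only [if_neg h28, if_pos h29]
          match d with
          | 0 => simp [chain]
          | k + 1 =>
            have hne : ¬ ((k + 1 : Nat) : Int) + 1 - 1 = 0 := by push_cast; omega
            simp only [if_neg hne, Option.bind_some]
            have harith : ((k + 1 : Nat) : Int) + 1 - 1 = ((k : Nat) : Int) + 1 := by push_cast; ring
            rw [harith, loopA_eq_chain data (p + 1) k]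
        · -- non-paren token: both advance by the same amount
          by_cases h67 : c = 0x26 ∨ c = 0x27
          · have hnt : ¬ (0x36 ≤ c ∧ c ≤ 0x55) := by omega
            simp only [if_neg h28, if_neg h29, if_pos h67, if_neg hnt]
            rw [loopA_eq_chain data (p + 1) d]
            show (scanB data (((data.length : Int) - (p + 1)).toNat + 1) (p + 1)).bind (chain data d) = _
            rw [scanB_irrel data (((data.length : Int) - (p + 1)).toNat + 1) (((data.length : Int) - p).toNat) (p + 1) (by omega) (by omega)]
          · by_cases htok : 0x36 ≤ c ∧ c ≤ 0x55
            · simp only [if_neg h28, if_neg h29, if_neg h67, if_pos htok]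
              have w1 := vw_ge_one data (p + 1)
              have w2 := vw_ge_one data (p + 1 + vw data (p + 1))
              rw [loopA_eq_chain data (p + 1 + vw data (p + 1) + vw data (p + 1 + vw data (p + 1))) d]
              show (scanB data _ _).bind (chain data d) = _
              rw [scanB_irrel data ((((data.length : Int) - (p + 1 + vw data (p + 1) + vw data (p + 1 + vw data (p + 1))))).toNat + 1) (((data.length : Int) - p).toNat) _ (by omega) (by omega)]
            · simp only [if_neg h28, if_neg h29, if_neg h67, if_neg htok]
              rw [loopA_eq_chain data (p + 1) d]
              show (scanB data (((data.length : Int) - (p + 1)).toNat + 1) (p + 1)).bind (chain data d) = _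
              rw [scanB_irrel data (((data.length : Int) - (p + 1)).toNat + 1) (((data.length : Int) - p).toNat) (p + 1) (by omega) (by omega)]
  · rename_i hge
    rw [scanB]
    rw [if_neg hge]
    rfl
termination_by ((data.length : Int) - p).toNat
decreasing_by
  all_goals omega

-- ===== VERDICT (by name: the statement is the Claim_ definition above) =====
theorem parse_cond_expr_spec : Claim_equal_parse_cond_expr := by
  unfold Claim_equal_parse_cond_expr
  intro data start _ _
  unfold Spec_parse_cond_expr parse_cond_expr parse_cond_expr_alt
  split
  · rfl
  · rename_i hlt
    match hg : PySem.List.pyGet? data start with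
    | none => rfl
    | some c =>
      dsimp only
      by_cases h28 : c ≠ 0x28
      · rw [if_pos h28, if_pos h28]
      · rw [if_neg h28, if_neg h28]
        have h28' : c = 0x28 := not_not.mp h28
        -- A's loop takes its first step: reads the '(' at start, depth 0 becomes 1
        rw [loopA, dif_pos (show start < (data.length : Int) by omega), hg]
        dsimp only
        rw [if_pos h28']
        have h0 : (0 : Int) + 1 = ((0 : Nat) : Int) + 1 := by norm_num
        rw [h0, loopA_eq_chain data (start + 1) 0]
        show (scanB data (((data.length : Int) - (start + 1)).toNat + 1) (start + 1)).bind (chain data 0) = _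
        rw [scanB_irrel data (((data.length : Int) - (start + 1)).toNat + 1) (((data.length : Int) - start).toNat + 1) (start + 1) (by omega) (by omega)]
        match hs : scanB data (((data.length : Int) - start).toNat + 1) (start + 1) with
        | none => rfl
        | some q => rfl
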